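-- pv_equiv track=rewrite | github.com/roschart/adventofcode | 2024/02/python/day_02.py | validate_with_tolerance
-- ===== SOURCE A (Python) =====
-- from typing import Iterable
--
-- Report = Iterable[int]
--
-- def validate(report: Report) -> bool:
--     diffs = [b - a for a, b in zip(report, report[1:])]
--     ascending = all(d > 0 for d in diffs)
--     descending = all(d < 0 for d in diffs)
--     small_steps = all(1 <= abs(d) <= 3 for d in diffs)
--     return (ascending or descending) and small_steps
--
-- def validate_with_tolerance(report: Report) -> bool:
--     if validate(report):
--         return True
--     for i in range(len(report)):
--         modified_report = report[:i] + report[i+1:]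
--         if validate(modified_report):
--             return True
--     return False
-- ===== SOURCE B (Python) =====
-- def validate_with_tolerance(report):
--     # O(n): split into ascending/descending checks; at the first bad adjacent
--     # pair only removing one of its two endpoints can help.
--     def ok_dir(lo, hi):
--         pairs = list(zip(report, report[1:]))
--         j = None
--         for k, (a, b) in enumerate(pairs):
--             if not (lo <= b - a <= hi):
--                 j = k
--                 break
--         if j is None:
--             return True
--         for i in (j, j + 1):
--             ys = report[:i] + report[i + 1:]
--             if all(lo <= b - a <= hi for a, b in zip(ys, ys[1:])):
--                 return True
--         return False
--
--     return ok_dir(1, 3) or ok_dir(-3, -1)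
-- ===== Notes on version B (the rewrite author's own statement) =====
-- stated objective: faster
-- what changed: Instead of re-validating all n one-element removals, B splits the check into an ascending and a descending pass and, at the first bad adjacent pair of each pass, tests only the two removals that can fix it.
import Mathlib
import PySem

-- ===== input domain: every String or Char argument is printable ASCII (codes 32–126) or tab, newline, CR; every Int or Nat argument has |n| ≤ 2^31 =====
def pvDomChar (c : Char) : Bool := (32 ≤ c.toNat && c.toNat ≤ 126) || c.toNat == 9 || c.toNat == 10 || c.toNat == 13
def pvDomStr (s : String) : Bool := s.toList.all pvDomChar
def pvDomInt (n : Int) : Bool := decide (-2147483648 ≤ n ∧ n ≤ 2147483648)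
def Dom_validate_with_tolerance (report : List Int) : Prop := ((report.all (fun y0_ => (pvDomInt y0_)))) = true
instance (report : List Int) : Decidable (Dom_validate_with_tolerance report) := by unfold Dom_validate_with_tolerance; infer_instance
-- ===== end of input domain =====

-- B replaces A's scan over all n one-element removals by two direction passes that test
-- only the two removals adjacent to the first bad pair (faster: O(n) instead of O(n^2)).


-- ===== PORT A =====
-- report[1:] is drop 1, report[:i]/report[i+1:] are take i / drop (i+1): indices are
-- nonnegative, so Python slicing is exactly take/drop here.
def validateA (report : List Int) : Bool :=
  let diffs := (List.zip report (report.drop 1)).map (fun p => p.2 - p.1)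
  let ascending := diffs.all (fun d => decide (0 < d))
  let descending := diffs.all (fun d => decide (d < 0))
  let small_steps := diffs.all (fun d => decide (1 ≤ |d|) && decide (|d| ≤ 3))
  (ascending || descending) && small_steps

def validate_with_tolerance (report : List Int) : Bool :=
  if validateA report then true
  else (List.range report.length).any (fun i =>
    validateA (report.take i ++ report.drop (i+1)))

-- ===== PORT B =====
-- all(lo <= b-a <= hi for a,b in zip(ys, ys[1:]))
def chkB (lo hi : Int) (ys : List Int) : Bool :=
  (List.zip ys (ys.drop 1)).all (fun p => decide (lo ≤ p.2 - p.1) && decide (p.2 - p.1 ≤ hi))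

-- the for-loop with break over enumerate(pairs) is findIdx? on the pairs list
def okDir (lo hi : Int) (xs : List Int) : Bool :=
  match (List.zip xs (xs.drop 1)).findIdx?
      (fun p => !(decide (lo ≤ p.2 - p.1) && decide (p.2 - p.1 ≤ hi))) with
  | none => true
  | some j =>
      chkB lo hi (xs.take j ++ xs.drop (j+1)) ||
      chkB lo hi (xs.take (j+1) ++ xs.drop (j+2))

def validate_with_tolerance_alt (report : List Int) : Bool :=
  okDir 1 3 report || okDir (-3) (-1) report

-- ===== PRECONDITION & SPEC =====
def Spec_validate_with_tolerance (report : List Int) (out : Bool) : Prop := out = validate_with_tolerance_alt report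
instance (report : List Int) (out : Bool) : Decidable (Spec_validate_with_tolerance report out) := by unfold Spec_validate_with_tolerance; infer_instance

-- ===== CLAIM (what is proved, stated in full; the proofs are below) =====
def Claim_equal_validate_with_tolerance : Prop := ∀ (report : List Int), Dom_validate_with_tolerance report → Spec_validate_with_tolerance report (validate_with_tolerance report)

-- ===== LEMMAS AND PROOFS =====

-- "every adjacent pair of xs has difference in [lo,hi]"
def OkP (lo hi : Int) (xs : List Int) : Prop :=
  ∀ k (h : k + 1 < xs.length), lo ≤ xs[k+1] - xs[k] ∧ xs[k+1] - xs[k] ≤ hi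

theorem allPairs_iff (q : Int → Int → Bool) (xs : List Int) :
    ((List.zip xs (xs.drop 1)).all (fun p => q p.1 p.2) = true) ↔
      ∀ k (h : k + 1 < xs.length), q (xs[k]'(by omega)) (xs[k+1]) = true := by
  rw [List.all_eq_true]
  constructor
  · intro h k hk
    have hz : k < (List.zip xs (xs.drop 1)).length := by
      simp [List.length_zip]; omega
    have := h _ (List.getElem_mem hz)
    simpa [List.getElem_zip, List.getElem_drop] using this
  · intro h p hp
    obtain ⟨k, hk, rfl⟩ := List.mem_iff_getElem.mp hp
    have hk' : k + 1 < xs.length := by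
      simp [List.length_zip] at hk; omega
    simpa [List.getElem_zip, List.getElem_drop] using h k hk'

theorem chkB_iff (lo hi : Int) (xs : List Int) :
    chkB lo hi xs = true ↔ OkP lo hi xs := by
  unfold chkB OkP
  rw [allPairs_iff (fun a b => decide (lo ≤ b - a) && decide (b - a ≤ hi)) xs]
  simp

theorem validateA_iff (xs : List Int) :
    validateA xs = true ↔ (chkB 1 3 xs = true ∨ chkB (-3) (-1) xs = true) := by
  unfold validateA
  simp only [List.all_map, Function.comp_def, Bool.and_eq_true, Bool.or_eq_true]
  rw [chkB_iff, chkB_iff,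
    allPairs_iff (fun a b => decide (0 < b - a)),
    allPairs_iff (fun a b => decide (b - a < 0)),
    allPairs_iff (fun a b => decide (1 ≤ |b - a|) && decide (|b - a| ≤ 3))]
  unfold OkP
  simp only [Bool.and_eq_true, decide_eq_true_eq]
  constructor
  · rintro ⟨hdir | hdir, hsmall⟩
    · refine Or.inl (fun k h => ?_)
      have h1 := hdir k h
      obtain ⟨h2, h3⟩ := hsmall k h
      rw [Int.abs_eq_natAbs] at h2 h3
      constructor <;> omega
    · refine Or.inr (fun k h => ?_)
      have h1 := hdir k h
      obtain ⟨h2, h3⟩ := hsmall k h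
      rw [Int.abs_eq_natAbs] at h2 h3
      constructor <;> omega
  · rintro (h | h)
    · refine ⟨Or.inl (fun k hk => by have := h k hk; omega), fun k hk => ?_⟩
      have := h k hk
      constructor <;> (rw [Int.abs_eq_natAbs]; omega)
    · refine ⟨Or.inr (fun k hk => by have := h k hk; omega), fun k hk => ?_⟩
      have := h k hk
      constructor <;> (rw [Int.abs_eq_natAbs]; omega)

theorem chk_remove_false (lo hi : Int) (xs : List Int) (j i : Nat)
    (hj : j + 1 < xs.length)
    (hbad : ¬ (lo ≤ xs[j+1] - xs[j]'(by omega) ∧ xs[j+1] - xs[j]'(by omega) ≤ hi))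
    (hi1 : i ≠ j) (hi2 : i ≠ j + 1) :
    chkB lo hi (xs.take i ++ xs.drop (i+1)) = false := by
  rw [← List.eraseIdx_eq_take_drop_succ]
  by_contra hc
  rw [Bool.not_eq_false] at hc
  have hOk := (chkB_iff lo hi _).mp hc
  rcases Nat.lt_or_ge i xs.length with hilt | hige
  · have hlen : (xs.eraseIdx i).length = xs.length - 1 := by
      rw [List.length_eraseIdx]; simp [hilt]
    rcases Nat.lt_or_ge i j with hij | hij
    · have hj1 : j - 1 + 1 = j := by omega
      have hk : (j - 1) + 1 < (xs.eraseIdx i).length := by omega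
      have hpair := hOk (j - 1) hk
      simp only [List.getElem_eraseIdx, hj1] at hpair
      split_ifs at hpair <;> omega
    · have hij' : j + 1 < i := by omega
      have hk : j + 1 < (xs.eraseIdx i).length := by omega
      have hpair := hOk j hk
      simp only [List.getElem_eraseIdx] at hpair
      split_ifs at hpair <;> omega
  · rw [List.eraseIdx_of_length_le hige] at hOk
    exact hbad (hOk j hj)

theorem okDir_iff (lo hi : Int) (xs : List Int) :
    okDir lo hi xs = true ↔
      (chkB lo hi xs = true ∨
        ∃ i < xs.length, chkB lo hi (xs.take i ++ xs.drop (i+1)) = true) := by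
  unfold okDir
  cases hf : (List.zip xs (xs.drop 1)).findIdx?
      (fun p => !(decide (lo ≤ p.2 - p.1) && decide (p.2 - p.1 ≤ hi))) with
  | none =>
    rw [List.findIdx?_eq_none_iff] at hf
    simp only [true_iff]
    refine Or.inl ?_
    unfold chkB
    rw [List.all_eq_true]
    intro p hp
    have := hf p hp
    simpa using this
  | some j =>
    rw [List.findIdx?_eq_some_iff_findIdx_eq] at hf
    obtain ⟨hjlen, hfi⟩ := hf
    have hj1 : j + 1 < xs.length := by
      simp only [List.length_zip, List.length_drop] at hjlen; omega
    have hbadb := List.findIdx_getElem (p := fun p => !(decide (lo ≤ p.2 - p.1) && decide (p.2 - p.1 ≤ hi))) (xs := List.zip xs (xs.drop 1)) (w := by omega)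
    simp only [hfi] at hbadb
    have hbad : ¬ (lo ≤ xs[j+1] - xs[j]'(by omega) ∧ xs[j+1] - xs[j]'(by omega) ≤ hi) := by
      simp only [List.getElem_zip, List.getElem_drop, Nat.add_comm 1 j] at hbadb
      rintro ⟨hp, hq⟩
      simp at hbadb
      omega
    have hxs : chkB lo hi xs = false := by
      by_contra hc
      rw [Bool.not_eq_false] at hc
      exact hbad ((chkB_iff lo hi xs).mp hc j hj1)
    constructor
    · intro h
      rw [Bool.or_eq_true] at h
      refine Or.inr ?_
      rcases h with h | h
      · exact ⟨j, by omega, h⟩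
      · exact ⟨j + 1, by omega, h⟩
    · rintro (h | ⟨i, hiln, h⟩)
      · rw [hxs] at h; exact absurd h (by simp)
      · rw [Bool.or_eq_true]
        by_cases h1 : i = j
        · subst h1; exact Or.inl h
        · by_cases h2 : i = j + 1
          · subst h2; exact Or.inr h
          · have := chk_remove_false lo hi xs j i hj1 hbad h1 h2
            rw [this] at h; exact absurd h (by simp)

theorem main_iff (report : List Int) :
    validate_with_tolerance report = true ↔ validate_with_tolerance_alt report = true := by
  unfold validate_with_tolerance validate_with_tolerance_alt
  rw [Bool.or_eq_true, okDir_iff, okDir_iff]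
  by_cases hv : validateA report = true
  · simp only [hv, if_true, true_iff]
    rcases (validateA_iff report).mp hv with h | h
    · exact Or.inl (Or.inl h)
    · exact Or.inr (Or.inl h)
  · rw [Bool.not_eq_true] at hv
    simp only [hv, Bool.false_eq_true, if_false]
    rw [List.any_eq_true]
    constructor
    · rintro ⟨i, hmem, hval⟩
      rw [List.mem_range] at hmem
      rcases (validateA_iff _).mp hval with h | h
      · exact Or.inl (Or.inr ⟨i, hmem, h⟩)
      · exact Or.inr (Or.inr ⟨i, hmem, h⟩)
    · rintro (h | h) <;> rcases h with h | ⟨i, hiln, h⟩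
      · exact absurd ((validateA_iff report).mpr (Or.inl h)) (by simp [hv])
      · exact ⟨i, List.mem_range.mpr hiln, (validateA_iff _).mpr (Or.inl h)⟩
      · exact absurd ((validateA_iff report).mpr (Or.inr h)) (by simp [hv])
      · exact ⟨i, List.mem_range.mpr hiln, (validateA_iff _).mpr (Or.inr h)⟩

-- ===== VERDICT (by name: the statement is the Claim_ definition above) =====
theorem validate_with_tolerance_spec : Claim_equal_validate_with_tolerance := by
  intro report _
  unfold Spec_validate_with_tolerance
  exact Bool.eq_iff_iff.mpr (main_iff report)
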